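-- pv_equiv track=rewrite | github.com/tarkatan/project1 | Desktop/programa/3.py | gronsfeld_decrypt
-- ===== SOURCE A (Python) =====
-- def gronsfeld_decrypt(encrypted_text, homophones):
--     """
--     Розшифрування тексту за допомогою таблиці гомофонів.
--     """
--     # Створюємо зворотну таблицю для розшифрування
--     reverse_homophones = {}
--     for letter, codes in homophones.items():
--         for code in codes:
--             reverse_homophones[code] = letter
--
--     decrypted_text = []
--
--     # Розбиваємо зашифрований текст по пробілах
--     encrypted_parts = encrypted_text.split()
--
--     for part in encrypted_parts:
--         if part in reverse_homophones:
--             decrypted_text.append(reverse_homophones[part])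
--         else:
--             decrypted_text.append(part)
--
--     return ''.join(decrypted_text)
-- ===== SOURCE B (Python) =====
-- def gronsfeld_decrypt(encrypted_text, homophones):
--     out = []
--     for part in encrypted_text.split():
--         best = part
--         for letter, codes in homophones.items():
--             if part in codes:
--                 best = letter  # keep the LAST matching letter (matches dict overwrite)
--         out.append(best)
--     return ''.join(out)
-- ===== Notes on version B (the rewrite author's own statement) =====
-- stated objective: alternative
-- what changed: B skips building the reverse code->letter table: it scans homophones.items() per word, keeping the last letter whose code list contains the word.
import Mathlib
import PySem

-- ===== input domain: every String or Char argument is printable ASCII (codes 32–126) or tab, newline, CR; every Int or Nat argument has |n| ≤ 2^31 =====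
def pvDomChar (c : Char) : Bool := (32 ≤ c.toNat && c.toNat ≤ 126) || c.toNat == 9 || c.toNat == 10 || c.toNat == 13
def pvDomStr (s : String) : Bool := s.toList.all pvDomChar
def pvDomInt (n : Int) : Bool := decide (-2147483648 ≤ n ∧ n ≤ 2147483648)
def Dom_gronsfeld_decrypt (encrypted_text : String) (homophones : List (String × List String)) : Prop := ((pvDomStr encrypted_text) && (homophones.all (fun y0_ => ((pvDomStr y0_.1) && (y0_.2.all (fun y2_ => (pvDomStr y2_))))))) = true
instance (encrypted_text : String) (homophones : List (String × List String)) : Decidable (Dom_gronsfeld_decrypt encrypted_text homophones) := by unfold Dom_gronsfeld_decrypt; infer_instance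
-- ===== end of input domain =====

-- B replaces A's reverse lookup table by a per-word scan of homophones keeping the last matching letter (alternative decomposition, no speed claim).

-- ===== PORT A =====
-- reverse_homophones: for letter, codes in homophones.items(): for code in codes: reverse_homophones[code] = letter
def gronsfeld_decrypt (encrypted_text : String) (homophones : List (String × List String)) : String :=
  let reverse_homophones : PySem.Dict String String :=
    homophones.foldl (fun d p => p.2.foldl (fun d code => d.insert code p.1) d) PySem.Dict.empty
  let encrypted_parts := PySem.Str.split₀ encrypted_text
  let decrypted_text : List String :=
    encrypted_parts.foldl (fun acc part =>
      match reverse_homophones.get? part with   -- 'if part in reverse_homophones: …[part]'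
      | some letter => acc ++ [letter]
      | none => acc ++ [part]) []
  PySem.Str.join "" decrypted_text

-- ===== PORT B =====
def gronsfeld_decrypt_alt (encrypted_text : String) (homophones : List (String × List String)) : String :=
  let out : List String :=
    (PySem.Str.split₀ encrypted_text).foldl (fun acc part =>
      acc ++ [homophones.foldl (fun best p => if part ∈ p.2 then p.1 else best) part]) []
  PySem.Str.join "" out

-- ===== PRECONDITION & SPEC =====
def Spec_gronsfeld_decrypt (encrypted_text : String) (homophones : List (String × List String)) (out : String) : Prop := out = gronsfeld_decrypt_alt encrypted_text homophones
instance (encrypted_text : String) (homophones : List (String × List String)) (out : String) : Decidable (Spec_gronsfeld_decrypt encrypted_text homophones out) := by unfold Spec_gronsfeld_decrypt; infer_instance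

-- ===== CLAIM (what is proved, stated in full; the proofs are below) =====
def Claim_equal_gronsfeld_decrypt : Prop := ∀ (encrypted_text : String) (homophones : List (String × List String)), Dom_gronsfeld_decrypt encrypted_text homophones → Spec_gronsfeld_decrypt encrypted_text homophones (gronsfeld_decrypt encrypted_text homophones)

-- ===== LEMMAS AND PROOFS =====

-- Inner loop of A's table build: inserting the same letter at every code.
theorem pv_inner_get (codes : List String) (l part : String) (d : PySem.Dict String String) :
    (codes.foldl (fun d code => d.insert code l) d).get? part
      = if part ∈ codes then some l else d.get? part := by
  induction codes generalizing d with
  | nil => simp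
  | cons c cs ih =>
      simp only [List.foldl_cons, ih, List.mem_cons, PySem.Dict.get?_insert]
      by_cases h1 : part ∈ cs <;> by_cases h2 : part = c <;> simp [h1, h2]

-- A's whole reverse table, looked up at one word, as a left fold over homophones.
theorem pv_rev_get (h : List (String × List String)) (part : String) (d : PySem.Dict String String) :
    (h.foldl (fun d p => p.2.foldl (fun d code => d.insert code p.1) d) d).get? part
      = h.foldl (fun r p => if part ∈ p.2 then some p.1 else r) (d.get? part) := by
  induction h generalizing d with
  | nil => rfl
  | cons p t ih => simp only [List.foldl_cons, ih, pv_inner_get]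

-- B's inner loop equals the option fold with a default.
theorem pv_alt_fold (h : List (String × List String)) (part : String) (o : Option String) (best : String) :
    h.foldl (fun best p => if part ∈ p.2 then p.1 else best) (o.getD best)
      = (h.foldl (fun r p => if part ∈ p.2 then some p.1 else r) o).getD best := by
  induction h generalizing o with
  | nil => rfl
  | cons p t ih =>
      simp only [List.foldl_cons]
      rw [show (if part ∈ p.2 then p.1 else o.getD best)
            = (if part ∈ p.2 then some p.1 else o).getD best by split <;> rfl, ih]

-- A two-branch Option match is Option.getD.
theorem pv_match_getD (part : String) (o : Option String) :
    (match o with | some l => l | none => part) = o.getD part := by cases o <;> rfl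

theorem pv_word_eq (homophones : List (String × List String)) (part : String) :
    (match (homophones.foldl (fun d p => p.2.foldl (fun d code => d.insert code p.1) d)
              PySem.Dict.empty).get? part with
      | some letter => letter
      | none => part)
      = homophones.foldl (fun best p => if part ∈ p.2 then p.1 else best) part := by
  rw [pv_rev_get]
  simp only [PySem.Dict.get?_empty]
  rw [pv_match_getD]
  exact (pv_alt_fold homophones part none part).symm

-- ===== VERDICT (by name: the statement is the Claim_ definition above) =====
theorem gronsfeld_decrypt_spec : Claim_equal_gronsfeld_decrypt := by
  intro encrypted_text homophones _
  unfold Spec_gronsfeld_decrypt gronsfeld_decrypt gronsfeld_decrypt_alt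
  simp only
  congr 1
  rw [show (fun (acc : List String) part =>
        match (homophones.foldl (fun d p => p.2.foldl (fun d code => d.insert code p.1) d)
                PySem.Dict.empty).get? part with
        | some letter => acc ++ [letter]
        | none => acc ++ [part])
      = (fun acc part => acc ++ [match (homophones.foldl (fun d p => p.2.foldl (fun d code => d.insert code p.1) d)
                PySem.Dict.empty).get? part with
        | some letter => letter
        | none => part]) by
      funext acc part
      cases (homophones.foldl (fun d p => p.2.foldl (fun d code => d.insert code p.1) d)
                PySem.Dict.empty).get? part <;> rfl]
  rw [PySem.List.foldl_append_singleton_eq_map, PySem.List.foldl_append_singleton_eq_map]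
  simp only [pv_word_eq]
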